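-- pv_equiv track=rewrite | github.com/AD1967/pni-backlog | neuralApp/app/neural/neural_module.py | GetRelativeIndex
-- ===== SOURCE A (Python) =====
-- def GetRelativeIndex(target, indexes):
--     flag = True
--     local_indexes = indexes.copy()
--     local_indexes.sort()
--     i = 0
--     while flag and i < len(local_indexes):
--         if target < local_indexes[i]:
--             flag = False
--         else:
--             i += 1
--     return i
-- ===== SOURCE B (Python) =====
-- def GetRelativeIndex(target, indexes):
--     return sum(1 for x in indexes if x <= target)
-- ===== Notes on version B (the rewrite author's own statement) =====
-- stated objective: simpler
-- what changed: Replaced copy+sort+sequential scan with a single order-independent linear count of elements <= target.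
import Mathlib
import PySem

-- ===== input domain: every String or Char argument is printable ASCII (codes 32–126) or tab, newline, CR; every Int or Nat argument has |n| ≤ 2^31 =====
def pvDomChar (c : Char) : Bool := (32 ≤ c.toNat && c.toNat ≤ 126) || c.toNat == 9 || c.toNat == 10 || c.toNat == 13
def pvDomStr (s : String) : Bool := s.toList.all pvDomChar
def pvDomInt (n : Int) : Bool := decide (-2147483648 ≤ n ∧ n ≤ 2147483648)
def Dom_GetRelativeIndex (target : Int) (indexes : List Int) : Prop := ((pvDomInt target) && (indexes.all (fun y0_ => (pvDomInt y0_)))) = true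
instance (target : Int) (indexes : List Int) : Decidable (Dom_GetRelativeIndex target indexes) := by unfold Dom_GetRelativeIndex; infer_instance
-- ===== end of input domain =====

-- B replaces A's copy+sort+scan with a single order-independent linear count of elements ≤ target.

-- ===== PORT A =====
-- the while loop over the sorted copy: advance i while not (target < current), stop at the first greater element
def pvALoop (target : Int) : List Int → Int → Int
  | [], i => i
  | x :: xs, i => if target < x then i else pvALoop target xs (i + 1)

def GetRelativeIndex (target : Int) (indexes : List Int) : Int :=
  pvALoop target (PySem.List.sorted indexes (fun x => x) false) 0

-- ===== PORT B =====
def GetRelativeIndex_alt (target : Int) (indexes : List Int) : Int :=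
  (indexes.countP (fun x => decide (x ≤ target)) : Int)

-- ===== PRECONDITION & SPEC =====
def Spec_GetRelativeIndex (target : Int) (indexes : List Int) (out : Int) : Prop := out = GetRelativeIndex_alt target indexes
instance (target : Int) (indexes : List Int) (out : Int) : Decidable (Spec_GetRelativeIndex target indexes out) := by unfold Spec_GetRelativeIndex; infer_instance

-- ===== CLAIM (what is proved, stated in full; the proofs are below) =====
def Claim_equal_GetRelativeIndex : Prop := ∀ (target : Int) (indexes : List Int), Dom_GetRelativeIndex target indexes → Spec_GetRelativeIndex target indexes (GetRelativeIndex target indexes)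

-- ===== LEMMAS AND PROOFS =====

-- on a nondecreasing list the stop-at-first-greater scan counts exactly the elements ≤ target
theorem pvALoop_sorted (target : Int) (l : List Int) (hs : l.Pairwise (· ≤ ·)) (i : Int) :
    pvALoop target l i = i + (l.countP (fun x => decide (x ≤ target)) : Int) := by
  induction l generalizing i with
  | nil => simp [pvALoop]
  | cons x xs ih =>
    rcases List.pairwise_cons.mp hs with ⟨hx, hxs⟩
    by_cases h : target < x
    · have hz : xs.countP (fun x => decide (x ≤ target)) = 0 := by
        rw [List.countP_eq_zero]
        intro y hy
        simpa using lt_of_lt_of_le h (hx y hy)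
      simp [pvALoop, h, hz, not_le.mpr h]
    · have hle : x ≤ target := not_lt.mp h
      simp [pvALoop, h, ih hxs, hle]
      omega

-- ===== VERDICT (by name: the statement is the Claim_ definition above) =====
theorem GetRelativeIndex_spec : Claim_equal_GetRelativeIndex := by
  intro target indexes _
  unfold Spec_GetRelativeIndex GetRelativeIndex GetRelativeIndex_alt
  rw [pvALoop_sorted target _ (PySem.List.sorted_pairwise indexes (fun x => x)) 0,
    (PySem.List.sorted_perm indexes (fun x => x) false).countP_eq]
  simp
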